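-- pv_equiv track=rewrite | github.com/joshnielsen876/Promptimizer | acc_by_class.py | analyze_results_by_generation
-- ===== SOURCE A (Python) =====
-- from collections import defaultdict
--
-- def analyze_results_by_generation(answer_tracker):
--     generation_data = defaultdict(list)
--
--     # Group data by generation
--     for generation, item_index, result, response, answer in answer_tracker:
--         result = result.lower() if result is not None else None
--         answer = answer.lower()
--         generation_data[generation].append((item_index, result, answer))
--
--     generation_accuracies = {}
--     generation_none_counts = defaultdict(int)
--
--     # Calculate accuracy and None counts for each generation
--     for generation, data in generation_data.items():
--         total_items = len(data)
--         correct_items = 0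
--
--         class_correct = defaultdict(int)
--         class_total = defaultdict(int)
--
--         for _, result, answer in data:
--             class_total[answer] += 1
--             if result == answer:
--                 correct_items += 1
--                 class_correct[answer] += 1
--             if result is None:
--                 generation_none_counts[generation] += 1
--         overall_score = correct_items  # Out of 30
--         class_scores = {cls: class_correct[cls] for cls in class_total}
--         # class_scores = {cls: class_correct[cls] for cls in class_total}
--
--         generation_accuracies[generation] = (overall_score, class_scores)
--
--     return generation_accuracies, generation_none_counts
-- ===== SOURCE B (Python) =====
-- from collections import defaultdict
--
-- def analyze_results_by_generation(answer_tracker):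
--     rows = [(g, r.lower() if r is not None else None, a.lower())
--             for g, _, r, _, a in answer_tracker]
--     gens = list(dict.fromkeys(g for g, _, _ in rows))
--
--     def stats(g):
--         mine = [(r, a) for gg, r, a in rows if gg == g]
--         score = sum(1 for r, a in mine if r == a)
--         classes = list(dict.fromkeys(a for _, a in mine))
--         cls_scores = {c: sum(1 for r, a in mine if r == a and a == c) for c in classes}
--         nones = sum(1 for r, _ in mine if r is None)
--         return score, cls_scores, nones
--
--     per = {g: stats(g) for g in gens}
--     accs = {g: (per[g][0], per[g][1]) for g in gens}
--     none_counts = defaultdict(int, {g: per[g][2] for g in gens if per[g][2]})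
--     return accs, none_counts
-- ===== Notes on version B (the rewrite author's own statement) =====
-- stated objective: alternative
-- what changed: Replaces A's group-into-a-dict-of-lists pass followed by a stateful inner accumulation loop (four mutable dicts/counters) with a declarative per-generation recomputation: dedup the generations once, then for each generation filter its rows and compute score, per-class scores and None count as comprehension counts.
import Mathlib
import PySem

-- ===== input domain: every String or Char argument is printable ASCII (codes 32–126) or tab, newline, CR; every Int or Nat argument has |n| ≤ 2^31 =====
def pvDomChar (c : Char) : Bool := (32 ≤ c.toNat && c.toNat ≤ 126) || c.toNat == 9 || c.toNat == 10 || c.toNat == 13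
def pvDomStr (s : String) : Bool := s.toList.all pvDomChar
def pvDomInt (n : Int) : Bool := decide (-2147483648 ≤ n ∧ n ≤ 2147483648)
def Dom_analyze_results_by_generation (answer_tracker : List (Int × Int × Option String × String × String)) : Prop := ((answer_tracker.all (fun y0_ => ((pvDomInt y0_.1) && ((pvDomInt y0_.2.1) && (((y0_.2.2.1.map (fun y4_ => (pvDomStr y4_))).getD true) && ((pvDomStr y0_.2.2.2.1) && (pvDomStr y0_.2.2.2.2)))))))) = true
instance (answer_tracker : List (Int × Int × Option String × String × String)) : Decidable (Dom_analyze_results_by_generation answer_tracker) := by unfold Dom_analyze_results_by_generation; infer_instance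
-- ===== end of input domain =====

-- B replaces A's dict-of-lists grouping + stateful accumulation loop by a declarative
-- per-generation filter-and-count recomputation (objective: alternative, not faster).

-- ===== PORT A =====
-- the processed row appended to generation_data[generation]: (item_index, result.lower() or None, answer.lower())
def pvRowA (r : Int × Int × Option String × String × String) : Int × Option String × String :=
  (r.2.1, r.2.2.1.map PySem.Str.lower, PySem.Str.lower r.2.2.2.2)

-- body of A's inner 'for _, result, answer in data' loop; state = (correct_items, class_correct, class_total, generation_none_counts)
def pvInnerA (gen : Int)
    (s : Int × PySem.Dict String Int × PySem.Dict String Int × PySem.Dict Int Int)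
    (row : Int × Option String × String) :
    Int × PySem.Dict String Int × PySem.Dict String Int × PySem.Dict Int Int :=
  let ct := s.2.2.1.modify row.2.2 0 (· + 1)
  let cp := if row.2.1 = some row.2.2 then (s.1 + 1, s.2.1.modify row.2.2 0 (· + 1)) else (s.1, s.2.1)
  let nc := if row.2.1 = none then s.2.2.2.modify gen 0 (· + 1) else s.2.2.2
  (cp.1, cp.2, ct, nc)

def analyze_results_by_generation (answer_tracker : List (Int × Int × Option String × String × String)) : (List (Int × Int × (List (String × Int)))) × (List (Int × Int)) :=
  let generation_data : PySem.Dict Int (List (Int × Option String × String)) :=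
    answer_tracker.foldl (fun d r => d.modify r.1 [] (· ++ [pvRowA r])) PySem.Dict.empty
  let res :=
    generation_data.items.foldl
      (fun (acc : PySem.Dict Int (Int × List (String × Int)) × PySem.Dict Int Int) gd =>
        let st := gd.2.foldl (pvInnerA gd.1) (0, PySem.Dict.empty, PySem.Dict.empty, acc.2)
        (acc.1.insert gd.1 (st.1, st.2.2.1.keys.map (fun c => (c, st.2.1.getD c 0))), st.2.2.2))
      (PySem.Dict.empty, PySem.Dict.empty)
  (res.1.items, res.2.items)

-- ===== PORT B =====
-- rows = [(g, r.lower() if r is not None else None, a.lower()) for g, _, r, _, a in answer_tracker]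
def pvRowB (r : Int × Int × Option String × String × String) : Int × Option String × String :=
  (r.1, r.2.2.1.map PySem.Str.lower, PySem.Str.lower r.2.2.2.2)

-- stats(g): mine = rows of generation g; (score, cls_scores, nones)
def pvStatsB (rows : List (Int × Option String × String)) (g : Int) : Int × List (String × Int) × Int :=
  let mine := (rows.filter (fun r => r.1 == g)).map (fun r => (r.2.1, r.2.2))
  let score : Int := ((mine.filter (fun p => p.1 == some p.2)).length : Int)
  let classes := PySem.List.dedup (mine.map (·.2))
  let cls_scores := classes.map (fun c => (c, ((mine.filter (fun p => p.1 == some p.2 && p.2 == c)).length : Int)))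
  let nones : Int := ((mine.filter (fun p => p.1 == (none : Option String))).length : Int)
  (score, cls_scores, nones)

def analyze_results_by_generation_alt (answer_tracker : List (Int × Int × Option String × String × String)) : (List (Int × Int × (List (String × Int)))) × (List (Int × Int)) :=
  let rows := answer_tracker.map pvRowB
  let gens := PySem.List.dedup (rows.map (·.1))
  let accs := gens.map (fun g => (g, (pvStatsB rows g).1, (pvStatsB rows g).2.1))
  let none_counts := gens.filterMap (fun g =>
    if (pvStatsB rows g).2.2 = 0 then none else some (g, (pvStatsB rows g).2.2))
  (accs, none_counts)

-- ===== PRECONDITION & SPEC =====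
def Spec_analyze_results_by_generation (answer_tracker : List (Int × Int × Option String × String × String)) (out : (List (Int × Int × (List (String × Int)))) × (List (Int × Int))) : Prop := out = analyze_results_by_generation_alt answer_tracker
instance (answer_tracker : List (Int × Int × Option String × String × String)) (out : (List (Int × Int × (List (String × Int)))) × (List (Int × Int))) : Decidable (Spec_analyze_results_by_generation answer_tracker out) := by unfold Spec_analyze_results_by_generation; infer_instance

-- ===== CLAIM (what is proved, stated in full; the proofs are below) =====
def Claim_equal_analyze_results_by_generation : Prop := ∀ (answer_tracker : List (Int × Int × Option String × String × String)), Dom_analyze_results_by_generation answer_tracker → Spec_analyze_results_by_generation answer_tracker (analyze_results_by_generation answer_tracker)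

-- ===== LEMMAS AND PROOFS =====


theorem innerA_fst (g : Int) (data : List (Int × Option String × String)) :
    ∀ s, (data.foldl (pvInnerA g) s).1 = s.1 + ((data.filter (fun row => row.2.1 == some row.2.2)).length : Int) := by
  induction data with
  | nil => simp
  | cons row rest ih =>
    intro s
    by_cases h : row.2.1 = some row.2.2 <;> (simp [pvInnerA, h, ih]; try ring)

theorem innerA_cc (g : Int) (data : List (Int × Option String × String)) :
    ∀ s, (data.foldl (pvInnerA g) s).2.1
      = ((data.filter (fun row => row.2.1 == some row.2.2)).map (·.2.2)).foldl (fun d a => d.modify a 0 (· + 1)) s.2.1 := by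
  induction data with
  | nil => simp
  | cons row rest ih =>
    intro s
    by_cases h : row.2.1 = some row.2.2 <;> simp [pvInnerA, h, ih]

theorem innerA_ct (g : Int) (data : List (Int × Option String × String)) :
    ∀ s, (data.foldl (pvInnerA g) s).2.2.1
      = (data.map (·.2.2)).foldl (fun d a => d.modify a 0 (· + 1)) s.2.2.1 := by
  induction data with
  | nil => simp
  | cons row rest ih =>
    intro s
    by_cases h : row.2.1 = some row.2.2 <;> simp [pvInnerA, h, ih]

theorem innerA_nc (g : Int) (data : List (Int × Option String × String)) :
    ∀ s, (data.foldl (pvInnerA g) s).2.2.2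
      = ((data.filter (fun row => row.2.1 == (none : Option String))).map (fun _ => g)).foldl (fun d x => d.modify x 0 (· + 1)) s.2.2.2 := by
  induction data with
  | nil => simp
  | cons row rest ih =>
    intro s
    by_cases h : row.2.1 = none <;> by_cases h2 : row.2.1 = some row.2.2 <;>
      simp [pvInnerA, h, h2, ih]

theorem count_map_const {α : Type} (L : List α) (g g' : Int) :
    ((L.map (fun _ => g)).count g') = if g' = g then L.length else 0 := by
  rw [List.map_const', List.count_replicate]
  rcases eq_or_ne g' g with rfl | h
  · simp
  · simp [h, h.symm]

theorem ofList_map_const {α : Type} (L : List α) (g : Int) :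
    PySem.Set.ofList (L.map (fun _ => g)) = if L.isEmpty then [] else [g] := by
  induction L with
  | nil => simp
  | cons x rest ih =>
    simp only [List.map_cons, List.isEmpty_cons]
    rw [PySem.Set.ofList_cons]
    cases rest <;> simp_all [PySem.Set.discard]

theorem update_map_const {α : Type} (s : List Int) (L : List α) (g : Int) (h : g ∉ s) :
    PySem.Set.update s (L.map (fun _ => g)) = if L.isEmpty then s else s ++ [g] := by
  rw [PySem.Set.update_eq_append_filter, ofList_map_const]
  cases L <;> simp_all [PySem.Set.contains]

def pvScore (data : List (Int × Option String × String)) : Int :=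
  ((data.filter (fun row => row.2.1 == some row.2.2)).length : Int)
def pvCls (data : List (Int × Option String × String)) : List (String × Int) :=
  (PySem.Set.ofList (data.map (·.2.2))).map
    (fun c => (c, (((data.filter (fun row => row.2.1 == some row.2.2)).map (·.2.2)).count c : Int)))
def pvNones (data : List (Int × Option String × String)) : Nat :=
  (data.filter (fun row => row.2.1 == (none : Option String))).length

-- facts about the nc fold starting from a dict not containing g
theorem ncfold_keys (L : List (Int × Option String × String)) (g : Int) (nc : PySem.Dict Int Int)
    (h : g ∉ nc.keys) :
    ((L.map (fun _ => g)).foldl (fun d x => d.modify x 0 (· + 1)) nc).keys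
      = if L.isEmpty then nc.keys else nc.keys ++ [g] := by
  rw [PySem.Dict.keys_foldl_modify, update_map_const _ _ _ h]

theorem ncfold_getD (L : List (Int × Option String × String)) (g v : Int) (nc : PySem.Dict Int Int) :
    ((L.map (fun _ => g)).foldl (fun d x => d.modify x 0 (· + 1)) nc).getD v 0
      = nc.getD v 0 + (if v = g then (L.length : Int) else 0) := by
  rw [PySem.Dict.getD_foldl_modify_add_one, count_map_const]
  split <;> simp

theorem ncfold_items (L : List (Int × Option String × String)) (g : Int) (nc : PySem.Dict Int Int)
    (hnd : nc.keys.Nodup) (h : g ∉ nc.keys) :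
    ((L.map (fun _ => g)).foldl (fun d x => d.modify x 0 (· + 1)) nc).items
      = nc.items ++ (if L.isEmpty then [] else [(g, (L.length : Int))]) := by
  have hnd' : ((L.map (fun _ => g)).foldl (fun d x => d.modify x 0 (· + 1)) nc).keys.Nodup :=
    PySem.Dict.nodup_keys_foldl_modify_key (key := fun x => x) _ 0 _ nc hnd
  rw [PySem.Dict.items_eq_map_keys _ hnd' 0, ncfold_keys _ _ _ h]
  have hmap : nc.keys.map (fun k => (k, ((L.map (fun _ => g)).foldl (fun d x => d.modify x 0 (· + 1)) nc).getD k 0))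
      = nc.items := by
    rw [PySem.Dict.items_eq_map_keys nc hnd 0]
    apply List.map_congr_left
    intro k hk
    rw [ncfold_getD]
    have : ¬ k = g := fun e => h (e ▸ hk)
    simp [this]
  cases L with
  | nil => simpa using hmap
  | cons x rest =>
    rw [if_neg (by simp), if_neg (by simp), List.map_append, hmap]
    congr 1
    have hgd := ncfold_getD (x :: rest) g g nc
    rw [if_pos rfl] at hgd
    have hc : nc.contains g = false := by
      rw [PySem.Dict.contains_eq_decide_mem_keys]; simp [h]
    rw [PySem.Dict.getD_of_not_contains nc 0 hc] at hgd
    rw [List.map_const'] at hgd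
    simp only [List.length_cons, List.replicate_succ, List.foldl_cons] at hgd
    simp [hgd]

theorem innerA_value (g : Int) (data : List (Int × Option String × String)) (nc : PySem.Dict Int Int) :
    ((data.foldl (pvInnerA g) (0, PySem.Dict.empty, PySem.Dict.empty, nc)).1,
     (data.foldl (pvInnerA g) (0, PySem.Dict.empty, PySem.Dict.empty, nc)).2.2.1.keys.map
       (fun c => (c, (data.foldl (pvInnerA g) (0, PySem.Dict.empty, PySem.Dict.empty, nc)).2.1.getD c 0)))
      = (pvScore data, pvCls data) := by
  rw [innerA_fst, innerA_ct, innerA_cc, PySem.Dict.keys_foldl_modify]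
  simp only [pvScore, pvCls, Prod.mk.injEq]
  refine ⟨by simp, ?_⟩
  · rw [show (PySem.Dict.empty : PySem.Dict String Int).keys = [] from rfl, PySem.Set.update_nil_left]
    apply List.map_congr_left
    intro c hc
    rw [PySem.Dict.getD_foldl_modify_add_one]
    simp

theorem innerA_ncitems (g : Int) (data : List (Int × Option String × String)) (nc : PySem.Dict Int Int)
    (hnd : nc.keys.Nodup) (h : g ∉ nc.keys) :
    (data.foldl (pvInnerA g) (0, PySem.Dict.empty, PySem.Dict.empty, nc)).2.2.2.items
      = nc.items ++ (if pvNones data = 0 then [] else [(g, (pvNones data : Int))]) := by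
  rw [innerA_nc, ncfold_items _ _ _ hnd h]
  simp only [pvNones]
  simp only [List.isEmpty_iff, List.length_eq_zero_iff]

theorem innerA_nckeys (g : Int) (data : List (Int × Option String × String)) (nc : PySem.Dict Int Int)
    (h : g ∉ nc.keys) :
    (data.foldl (pvInnerA g) (0, PySem.Dict.empty, PySem.Dict.empty, nc)).2.2.2.keys
      = if pvNones data = 0 then nc.keys else nc.keys ++ [g] := by
  rw [innerA_nc, ncfold_keys _ _ _ h]
  simp only [pvNones]
  simp only [List.isEmpty_iff, List.length_eq_zero_iff]

theorem pv_not_mem_contains (d : PySem.Dict Int (Int × List (String × Int))) (k : Int) (h : k ∉ d.keys) :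
    d.contains k = false := by
  rw [PySem.Dict.contains_eq_decide_mem_keys]; simp [h]

theorem loop2_char (items : List (Int × List (Int × Option String × String))) :
    ∀ (accs : PySem.Dict Int (Int × List (String × Int))) (nc : PySem.Dict Int Int),
    accs.keys.Nodup → nc.keys.Nodup → (items.map (·.1)).Nodup →
    (∀ p ∈ items, p.1 ∉ accs.keys) → (∀ p ∈ items, p.1 ∉ nc.keys) →
    (items.foldl
        (fun (acc : PySem.Dict Int (Int × List (String × Int)) × PySem.Dict Int Int) gd =>
          let st := gd.2.foldl (pvInnerA gd.1) (0, PySem.Dict.empty, PySem.Dict.empty, acc.2)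
          (acc.1.insert gd.1 (st.1, st.2.2.1.keys.map (fun c => (c, st.2.1.getD c 0))), st.2.2.2))
        (accs, nc)).1.items
        = accs.items ++ items.map (fun p => (p.1, pvScore p.2, pvCls p.2))
    ∧ (items.foldl
        (fun (acc : PySem.Dict Int (Int × List (String × Int)) × PySem.Dict Int Int) gd =>
          let st := gd.2.foldl (pvInnerA gd.1) (0, PySem.Dict.empty, PySem.Dict.empty, acc.2)
          (acc.1.insert gd.1 (st.1, st.2.2.1.keys.map (fun c => (c, st.2.1.getD c 0))), st.2.2.2))
        (accs, nc)).2.items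
        = nc.items ++ items.filterMap (fun p => if pvNones p.2 = 0 then none else some (p.1, (pvNones p.2 : Int))) := by
  induction items with
  | nil => intro accs nc _ _ _ _ _; simp
  | cons p rest ih =>
    intro accs nc hna hnn hnd hfa hfn
    have hpa : p.1 ∉ accs.keys := hfa p (by simp)
    have hpn : p.1 ∉ nc.keys := hfn p (by simp)
    simp only [List.foldl_cons]
    -- the new state
    have hval := innerA_value p.1 p.2 nc
    have hkeys' := innerA_nckeys p.1 p.2 nc hpn
    have hitems' := innerA_ncitems p.1 p.2 nc hnn hpn
    set st := p.2.foldl (pvInnerA p.1) (0, PySem.Dict.empty, PySem.Dict.empty, nc) with hst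
    have hv : (st.1, st.2.2.1.keys.map (fun c => (c, st.2.1.getD c 0))) = (pvScore p.2, pvCls p.2) := hval
    have hca : accs.contains p.1 = false := pv_not_mem_contains accs p.1 hpa
    -- nodups and freshness for the tail
    have hna' : (accs.insert p.1 (st.1, st.2.2.1.keys.map (fun c => (c, st.2.1.getD c 0)))).keys.Nodup :=
      PySem.Dict.nodup_keys_insert _ _ _ hna
    have hnn' : st.2.2.2.keys.Nodup := by
      rw [hkeys']
      split
      · exact hnn
      · exact List.Nodup.append hnn (by simp) (by simpa using fun h => hpn h)
    have hrest_ne : ∀ q ∈ rest, q.1 ≠ p.1 := by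
      intro q hq
      have := hnd
      simp only [List.map_cons, List.nodup_cons] at this
      exact fun e => this.1 (e ▸ List.mem_map_of_mem hq)
    have hfa' : ∀ q ∈ rest, q.1 ∉ (accs.insert p.1 (st.1, st.2.2.1.keys.map (fun c => (c, st.2.1.getD c 0)))).keys := by
      intro q hq
      rw [PySem.Dict.keys_insert_of_not_contains accs _ hca]
      simp only [List.mem_append, List.mem_singleton]
      rintro (h | h)
      · exact hfa q (by simp [hq]) h
      · exact hrest_ne q hq h
    have hfn' : ∀ q ∈ rest, q.1 ∉ st.2.2.2.keys := by
      intro q hq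
      rw [hkeys']
      split
      · exact hfn q (by simp [hq])
      · simp only [List.mem_append, List.mem_singleton]
        rintro (h | h)
        · exact hfn q (by simp [hq]) h
        · exact hrest_ne q hq h
    have hnd' : (rest.map (·.1)).Nodup := by
      simp only [List.map_cons, List.nodup_cons] at hnd
      exact hnd.2
    obtain ⟨h1, h2⟩ := ih (accs.insert p.1 (st.1, st.2.2.1.keys.map (fun c => (c, st.2.1.getD c 0)))) st.2.2.2
      hna' hnn' hnd' hfa' hfn'
    constructor
    · rw [h1, PySem.Dict.items_insert_of_not_contains accs _ hca, hv]
      simp [List.append_assoc]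
    · rw [h2, hitems']
      simp only [List.filterMap_cons]
      split <;> simp [List.append_assoc]

theorem statsB_eq (l : List (Int × Int × Option String × String × String)) (g : Int) :
    pvStatsB (l.map pvRowB) g
      = (pvScore ((l.filter (fun r => r.1 == g)).map pvRowA),
         pvCls ((l.filter (fun r => r.1 == g)).map pvRowA),
         (pvNones ((l.filter (fun r => r.1 == g)).map pvRowA) : Int)) := by
  simp only [pvStatsB, pvScore, pvCls, pvNones]
  have hmine : ((l.map pvRowB).filter (fun r => r.1 == g)).map (fun r => (r.2.1, r.2.2))
      = (l.filter (fun r => r.1 == g)).map (fun r => (r.2.2.1.map PySem.Str.lower, PySem.Str.lower r.2.2.2.2)) := by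
    rw [List.filter_map, List.map_map]
    simp [pvRowB, Function.comp_def]
  rw [hmine]
  simp only [Prod.mk.injEq]
  refine ⟨?_, ?_, ?_⟩
  · -- score
    rw [List.filter_map, List.filter_map]
    simp [pvRowA, Function.comp_def]
  · -- classes and their scores
    rw [List.map_map, List.map_map]
    simp only [Function.comp_def, pvRowA]
    apply List.map_congr_left
    intro c hc
    rw [List.filter_map, List.filter_map, List.map_map]
    simp only [List.length_map, Function.comp_def]
    congr 2
    rw [List.count_eq_countP, List.countP_map, ← List.countP_eq_length_filter]
    simp only [List.countP_filter]
    apply List.countP_congr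
    intro row _
    simp only [pvRowA, Function.comp_def]
    constructor
    · intro h; simp_all
      obtain ⟨⟨⟨a, ha, ha2⟩, hcc⟩, -⟩ := h
      exact ⟨a, ha, by rw [ha2, hcc]⟩
    · intro h; simp_all
      obtain ⟨⟨hcc, a, ha, ha2⟩, -⟩ := h
      exact ⟨a, ha, by rw [ha2, hcc]⟩
  · rw [List.filter_map, List.filter_map]
    simp [pvRowA, Function.comp_def]


-- ===== final assembly =====
theorem pv_main (l : List (Int × Int × Option String × String × String)) :
    analyze_results_by_generation l = analyze_results_by_generation_alt l := by
  have hkeys : (l.foldl (fun d r => d.modify r.1 [] (· ++ [pvRowA r])) (PySem.Dict.empty : PySem.Dict Int (List (Int × Option String × String)))).keys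
      = PySem.Set.ofList (l.map (·.1)) := by
    rw [PySem.Dict.keys_foldl_modify_key]
    simp [PySem.Set.update_nil_left]
  have hknd : (l.foldl (fun d r => d.modify r.1 [] (· ++ [pvRowA r])) (PySem.Dict.empty : PySem.Dict Int (List (Int × Option String × String)))).keys.Nodup := by
    apply PySem.Dict.nodup_keys_foldl_modify_key
    simp
  have hgetD : ∀ g, (l.foldl (fun d r => d.modify r.1 [] (· ++ [pvRowA r])) (PySem.Dict.empty : PySem.Dict Int (List (Int × Option String × String)))).getD g []
      = (l.filter (fun r => r.1 == g)).map pvRowA := by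
    intro g
    have h := PySem.Dict.getD_foldl_modify_append (l := l.map (fun r => (r.1, pvRowA r)))
        (d := (PySem.Dict.empty : PySem.Dict Int (List (Int × Option String × String)))) (c := g)
    rw [List.foldl_map] at h
    simpa [List.filter_map] using h
  have hitems : (l.foldl (fun d r => d.modify r.1 [] (· ++ [pvRowA r])) (PySem.Dict.empty : PySem.Dict Int (List (Int × Option String × String)))).items
      = (PySem.Set.ofList (l.map (·.1))).map (fun g => (g, (l.filter (fun r => r.1 == g)).map pvRowA)) := by
    rw [PySem.Dict.items_eq_map_keys _ hknd [], hkeys]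
    exact List.map_congr_left (fun g _ => by rw [hgetD g])
  obtain ⟨h1, h2⟩ := loop2_char
    ((l.foldl (fun d r => d.modify r.1 [] (· ++ [pvRowA r])) (PySem.Dict.empty : PySem.Dict Int (List (Int × Option String × String)))).items)
    PySem.Dict.empty PySem.Dict.empty (by simp) (by simp)
    (by simpa [PySem.Dict.keys] using hknd) (by simp) (by simp)
  simp only [analyze_results_by_generation, analyze_results_by_generation_alt]
  rw [h1, h2, hitems]
  have hgens : (l.map pvRowB).map (·.1) = l.map (·.1) := by
    simp [List.map_map, pvRowB, Function.comp_def]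
  simp only [List.map_map, List.filterMap_map, PySem.List.dedup_eq_ofList, hgens]
  simp only [Prod.mk.injEq]
  constructor
  · apply List.map_congr_left
    intro g _
    simp [statsB_eq]
  · apply List.filterMap_congr
    intro g _
    simp only [statsB_eq, Function.comp_def]
    split <;> split <;> simp_all

-- ===== VERDICT (by name: the statement is the Claim_ definition above) =====
theorem analyze_results_by_generation_spec : Claim_equal_analyze_results_by_generation := by
  intro l _
  unfold Spec_analyze_results_by_generation
  exact pv_main l
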